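-- pv_equiv track=rewrite | github.com/wzf-cn/how-to-think-like-a-computer-scientist | ch14/ch14_5.py | prime_misses
-- ===== SOURCE A (Python) =====
-- def is_prime(num):
--     flag = True
--     if num == 1:
--         return False
--     for i in range(2,num):
--         if num % i != 0:
--             continue
--         flag = False
--         break
--     return flag
--
-- def prime_list(num):
--     plist = []
--     for i in range(2,num + 1):
--         if is_prime(i):
--             plist.append(i)
--     return plist
--
-- def remove_adjacent_dups(xs):
--     """ Return a new list in which all adjacent
--         duplicates from xs have been removed.
--     """
--     result = []
--     most_recent_elem = None
--     for e in xs: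
--         if e != most_recent_elem:
--             result.append(e)
--             most_recent_elem = e
--
--     return result
--
-- def prime_misses(my_tickets):
--     new_list = []
--     for each_ticket in my_tickets:
--         new_list.extend(each_ticket[:])
--     new_list.sort()
--     num_in_tkts = remove_adjacent_dups(new_list)
--     plist = prime_list(49)
--
--     miss_prime = []
--     for prime in plist:
--         if prime in num_in_tkts:
--             continue
--         miss_prime.append(prime)
--
--     return miss_prime
-- ===== SOURCE B (Python) =====
-- def prime_misses(my_tickets):
--     limit = 49
--     is_composite = [False] * (limit + 1)
--     primes = []
--     for p in range(2, limit + 1):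
--         if not is_composite[p]:
--             primes.append(p)
--             for m in range(p * p, limit + 1, p):
--                 is_composite[m] = True
--     nums = set()
--     for t in my_tickets:
--         nums.update(t)
--     return [p for p in primes if p not in nums]
-- ===== Notes on version B (the rewrite author's own statement) =====
-- stated objective: faster
-- what changed: Primes are generated by a sieve of Eratosthenes (marking multiples, no trial division at all) instead of A's per-number trial-division loop, and A's concatenate-sort-remove-adjacent-duplicates pipeline is replaced by one pass unioning all tickets into a set.
import Mathlib
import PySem

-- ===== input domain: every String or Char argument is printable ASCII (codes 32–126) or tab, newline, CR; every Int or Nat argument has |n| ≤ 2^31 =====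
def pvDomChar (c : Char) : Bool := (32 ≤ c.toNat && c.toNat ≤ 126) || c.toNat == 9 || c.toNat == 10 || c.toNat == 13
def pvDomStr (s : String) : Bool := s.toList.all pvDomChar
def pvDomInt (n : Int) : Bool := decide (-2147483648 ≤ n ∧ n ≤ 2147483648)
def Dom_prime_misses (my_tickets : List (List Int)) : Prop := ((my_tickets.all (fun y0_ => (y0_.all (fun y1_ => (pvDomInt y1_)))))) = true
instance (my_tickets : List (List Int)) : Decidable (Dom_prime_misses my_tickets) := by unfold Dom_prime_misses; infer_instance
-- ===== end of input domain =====

-- B generates primes with a sieve of Eratosthenes (no trial division) and collects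
-- ticket numbers into a set in one pass instead of A's concatenate-sort-dedup pipeline;
-- objective: faster (constant factor, measured).


-- ===== PORT A =====
-- the 'for i in range(2,num)' loop of is_prime, with its early break on a divisor
def pvA_primeLoop (num : Int) : List Int → Bool
  | [] => true
  | i :: rest => if PySem.Int.mod num i ≠ 0 then pvA_primeLoop num rest else false

def pvA_is_prime (num : Int) : Bool :=
  if num = 1 then false
  else pvA_primeLoop num (PySem.List.pyRange 2 num 1)

def pvA_prime_list (num : Int) : List Int :=
  (PySem.List.pyRange 2 (num + 1) 1).foldl
    (fun plist i => if pvA_is_prime i then plist ++ [i] else plist) []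

def pvA_remove_adjacent_dups (xs : List Int) : List Int :=
  (xs.foldl
    (fun (st : List Int × Option Int) e =>
      if some e ≠ st.2 then (st.1 ++ [e], some e) else st)
    ([], none)).1

def prime_misses (my_tickets : List (List Int)) : List Int :=
  let new_list :=
    my_tickets.foldl (fun acc t => acc ++ PySem.List.slice t none none) []
  let new_list := PySem.List.sorted new_list (fun x => x) false
  let num_in_tkts := pvA_remove_adjacent_dups new_list
  let plist := pvA_prime_list 49
  plist.foldl (fun miss p => if num_in_tkts.contains p then miss else miss ++ [p]) []

-- ===== PORT B =====
-- one sieve step: 'if not is_composite[p]: append p; mark multiples of p'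
-- (indices p and m are always in 0..49 here, so List.getD/List.set are exact for the Python indexing)
def pvB_sieveStep (st : List Bool × List Int) (p : Int) : List Bool × List Int :=
  if st.1.getD p.toNat false then st
  else
    ((PySem.List.pyRange (p * p) 50 p).foldl (fun c m => c.set m.toNat true) st.1,
     st.2 ++ [p])

def pvB_primes : List Int :=
  ((PySem.List.pyRange 2 50 1).foldl pvB_sieveStep (List.replicate 50 false, [])).2

def prime_misses_alt (my_tickets : List (List Int)) : List Int :=
  let nums : PySem.Set Int :=
    my_tickets.foldl (fun s t => PySem.Set.update s t) PySem.Set.empty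
  pvB_primes.filter (fun p => !(PySem.Set.contains nums p))

-- ===== PRECONDITION & SPEC =====
def Spec_prime_misses (my_tickets : List (List Int)) (out : List Int) : Prop := out = prime_misses_alt my_tickets
instance (my_tickets : List (List Int)) (out : List Int) : Decidable (Spec_prime_misses my_tickets out) := by unfold Spec_prime_misses; infer_instance

-- ===== CLAIM (what is proved, stated in full; the proofs are below) =====
def Claim_equal_prime_misses : Prop := ∀ (my_tickets : List (List Int)), Dom_prime_misses my_tickets → Spec_prime_misses my_tickets (prime_misses my_tickets)

-- ===== LEMMAS AND PROOFS =====

-- both prime generators produce the same closed list of primes ≤ 49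
set_option maxRecDepth 4000 in
theorem pvA_plist_eq_pvB : pvA_prime_list 49 = pvB_primes := by decide

-- membership in remove_adjacent_dups' accumulator (invariant: the "most recent"
-- element, if any, is already in the accumulator)
theorem pvA_rad_mem (xs : List Int) (st : List Int × Option Int)
    (hinv : ∀ v, st.2 = some v → v ∈ st.1) (x : Int) :
    x ∈ (xs.foldl
      (fun (st : List Int × Option Int) e =>
        if some e ≠ st.2 then (st.1 ++ [e], some e) else st) st).1
    ↔ x ∈ st.1 ∨ x ∈ xs := by
  induction xs generalizing st with
  | nil => simp
  | cons e rest ih =>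
    simp only [List.foldl_cons]
    by_cases h : some e ≠ st.2
    · rw [if_pos h, ih _ (by intro v hv; simp at hv; simp [hv])]
      simp only [List.mem_append, List.mem_cons]
      tauto
    · rw [if_neg h, ih _ hinv]
      rw [not_not] at h
      have he : e ∈ st.1 := hinv e h.symm
      simp only [List.mem_cons]
      constructor
      · tauto
      · rintro (h1 | rfl | h2) <;> [exact Or.inl h1; exact Or.inl he; exact Or.inr h2]

-- membership in the one-pass set = membership in some ticket
theorem pvB_mem_nums (ts : List (List Int)) (s : PySem.Set Int) (x : Int) :
    x ∈ ts.foldl (fun s t => PySem.Set.update s t) s ↔ x ∈ s ∨ ∃ t ∈ ts, x ∈ t := by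
  induction ts generalizing s with
  | nil => simp
  | cons t rest ih =>
    simp only [List.foldl_cons, ih, PySem.Set.mem_update, List.mem_cons]
    constructor
    · rintro ((h | h) | ⟨u, hu, hx⟩)
      · exact Or.inl h
      · exact Or.inr ⟨t, Or.inl rfl, h⟩
      · exact Or.inr ⟨u, Or.inr hu, hx⟩
    · rintro (h | ⟨u, (rfl | hu), hx⟩)
      · exact Or.inl (Or.inl h)
      · exact Or.inl (Or.inr hx)
      · exact Or.inr ⟨u, hu, hx⟩

-- membership in A's concatenation of ticket copies = membership in some ticket
theorem pvA_mem_flat (ts : List (List Int)) (acc : List Int) (x : Int) :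
    x ∈ ts.foldl (fun acc t => acc ++ PySem.List.slice t none none) acc
    ↔ x ∈ acc ∨ ∃ t ∈ ts, x ∈ t := by
  induction ts generalizing acc with
  | nil => simp
  | cons t rest ih =>
    simp only [List.foldl_cons]
    rw [ih]
    simp only [PySem.List.slice_none_none, List.mem_append, List.mem_cons]
    constructor
    · rintro ((h | h) | ⟨u, hu, hx⟩)
      · exact Or.inl h
      · exact Or.inr ⟨t, Or.inl rfl, h⟩
      · exact Or.inr ⟨u, Or.inr hu, hx⟩
    · rintro (h | ⟨u, (rfl | hu), hx⟩)
      · exact Or.inl (Or.inl h)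
      · exact Or.inl (Or.inr hx)
      · exact Or.inr ⟨u, hu, hx⟩

-- A's final loop (skip members, append the rest) is a filter
theorem pvA_skip_loop (bad plist acc : List Int) :
    plist.foldl (fun miss p => if bad.contains p then miss else miss ++ [p]) acc
    = acc ++ plist.filter (fun p => !bad.contains p) := by
  induction plist generalizing acc with
  | nil => simp
  | cons p rest ih =>
    simp only [List.foldl_cons, List.filter_cons]
    by_cases h : bad.contains p
    · rw [if_pos h, ih]
      simp [List.contains_iff_mem.mp h]
    · rw [if_neg h, ih]
      have hm : p ∉ bad := fun hm => h (List.contains_iff_mem.mpr hm)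
      simp [hm]

-- ===== VERDICT (by name: the statement is the Claim_ definition above) =====
theorem prime_misses_spec : Claim_equal_prime_misses := by
  intro ts _
  unfold Spec_prime_misses prime_misses prime_misses_alt
  rw [pvA_skip_loop, pvA_plist_eq_pvB, List.nil_append]
  apply List.filter_congr
  intro p _
  have hiff : p ∈ pvA_remove_adjacent_dups (PySem.List.sorted
        (ts.foldl (fun acc t => acc ++ PySem.List.slice t none none) []) (fun x => x) false)
      ↔ p ∈ ts.foldl (fun s t => PySem.Set.update s t) PySem.Set.empty := by
    unfold pvA_remove_adjacent_dups
    rw [pvA_rad_mem _ _ (by simp), PySem.List.mem_sorted, pvA_mem_flat, pvB_mem_nums]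
    simp [PySem.Set.empty]
  by_cases h : p ∈ ts.foldl (fun s t => PySem.Set.update s t) PySem.Set.empty
  · rw [List.contains_iff_mem.mpr (hiff.mpr h), (PySem.Set.contains_iff _ _).mpr h]
  · rw [Bool.eq_false_iff.mpr (fun hc => h (hiff.mp (List.contains_iff_mem.mp hc))),
      Bool.eq_false_iff.mpr (fun hc => h ((PySem.Set.contains_iff _ _).mp hc))]
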